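-- pv_equiv track=rewrite | github.com/olkry/block_05_tasks | contest/final_encrypted_instructions.py | encrypted_instructions
-- ===== SOURCE A (Python) =====
-- def encrypted_instructions(instruction: str) -> str:
--     '''
--     Функция декодирующая команды для марсохода.
--
--     Аргументы:
--     instruction (str): Строка, содержащая вложенные команды с количеством
--     повторов в виде чисел.
--
--     Возвращает:
--     str: Последовательную строку с командами.
--     '''
--     command_stack: list[tuple[int, str]] = list()
--     repeat_count = result = ''
--     numbers_set = {str(num) for num in range(10)}
--
--     for char in instruction:
--         if char.isalpha():
--             result += char
--         elif char in numbers_set: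
--             repeat_count += char
--         elif char == '[':
--             command_stack.append((int(repeat_count), result))
--             repeat_count = result = ''
--         else:
--             count, previous_command = command_stack.pop()
--             result = previous_command + result * count
--     return result
-- ===== SOURCE B (Python) =====
-- def encrypted_instructions(instruction: str) -> str:
--     """Split-based two-phase decoder: the string is split on '[', each group's
--     repeat count is read up front from the digits of the preceding segment,
--     then one pass over the segments builds the result with a stack of saved
--     prefixes (no running digit accumulator)."""
--     segments = instruction.split('[')
--     counts = [int(''.join(ch for ch in seg if ch in '0123456789'))
--               for seg in segments[:-1]]
--
--     def run(stack, result, seg):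
--         for ch in seg:
--             if ch.isalpha():
--                 result += ch
--             elif ch not in '0123456789':
--                 count, previous = stack.pop()
--                 result = previous + result * count
--         return result
--
--     stack: list[tuple[int, str]] = []
--     result = run(stack, '', segments[0])
--     for count, seg in zip(counts, segments[1:]):
--         stack.append((count, result))
--         result = run(stack, '', seg)
--     return result
-- ===== Notes on version B (the rewrite author's own statement) =====
-- stated objective: alternative
-- what changed: B splits the string on '[' and reads each group's repeat count up front from the digits of the preceding segment, then decodes in one pass over the segments with a stack of saved prefixes, instead of A's single character scan that threads a running repeat_count accumulator through every step.
import Mathlib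
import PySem

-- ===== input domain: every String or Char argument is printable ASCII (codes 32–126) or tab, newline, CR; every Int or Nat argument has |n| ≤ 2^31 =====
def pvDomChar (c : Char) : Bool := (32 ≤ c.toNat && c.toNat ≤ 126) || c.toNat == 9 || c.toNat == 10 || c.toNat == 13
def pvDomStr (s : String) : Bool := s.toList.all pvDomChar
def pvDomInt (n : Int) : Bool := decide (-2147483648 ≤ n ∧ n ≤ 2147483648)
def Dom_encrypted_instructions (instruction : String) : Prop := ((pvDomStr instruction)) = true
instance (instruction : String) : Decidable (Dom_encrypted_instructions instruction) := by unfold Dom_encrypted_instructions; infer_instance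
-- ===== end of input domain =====

-- B re-reads each repeat count once from the split segments instead of carrying a running
-- digit accumulator through the single char-scan: a different decomposition (alternative), not faster.

-- ===== PORT A =====
-- numbers_set = {str(num) for num in range(10)}
def pvNumbersSet : PySem.Set String :=
  PySem.Set.ofList ((PySem.List.pyRange 0 10 1).map PySem.Int.toStr)

-- one iteration of A's loop; state = (command_stack, repeat_count, result)
def pvAStep (st : List (Int × List Char) × List Char × List Char) (c : Char) :
    List (Int × List Char) × List Char × List Char :=
  if PySem.Chars.isalpha c then              -- char.isalpha() on a 1-char str = the char test
    (st.1, st.2.1, st.2.2 ++ [c])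
  else if PySem.Set.contains pvNumbersSet (String.ofList [c]) then
    (st.1, st.2.1 ++ [c], st.2.2)
  else if c = '[' then
    -- int(repeat_count): ValueError on '' is excluded by Pre_ (getD 0 there)
    (((PySem.Int.ofChars? st.2.1).getD 0, st.2.2) :: st.1, [], [])
  else
    match st.1 with
    | [] => ([], st.2.1, st.2.2)             -- Python: IndexError (pop from empty); excluded by Pre_
    | (count, previous) :: rest =>
      -- result = previous_command + result * count  (count ≥ 0 here: it came from digits)
      (rest, st.2.1, previous ++ (List.replicate count.toNat st.2.2).flatten)

def encrypted_instructions (instruction : String) : String :=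
  String.ofList (instruction.toList.foldl pvAStep ([], [], [])).2.2

-- ===== PORT B =====
-- int(''.join(ch for ch in seg if ch in '0123456789')); 'ch in str' on a 1-char ch = membership
def pvCount (seg : List Char) : Int :=
  (PySem.Int.ofChars? (seg.filter (fun ch => decide (ch ∈ "0123456789".toList)))).getD 0

-- one iteration of run's loop; state = (stack, result)
def pvRunStep (st : List (Int × List Char) × List Char) (ch : Char) :
    List (Int × List Char) × List Char :=
  if PySem.Chars.isalpha ch then
    (st.1, st.2 ++ [ch])
  else if decide (ch ∈ "0123456789".toList) then
    st
  else
    match st.1 with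
    | [] => ([], st.2)                       -- Python: IndexError; excluded by Pre_
    | (count, previous) :: rest =>
      (rest, previous ++ (List.replicate count.toNat st.2).flatten)

-- run(stack, result, seg): returns the result and the stack it leaves behind (Python mutates it)
def pvRun (stack : List (Int × List Char)) (result : List Char) (seg : List Char) :
    List (Int × List Char) × List Char :=
  seg.foldl pvRunStep (stack, result)

def encrypted_instructions_alt (instruction : String) : String :=
  let segments := PySem.Chars.splitOn instruction.toList ['[']
  let counts := segments.dropLast.map pvCount
  match segments with
  | [] => ""                                 -- unreachable: str.split never returns an empty list
  | s0 :: rest =>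
    String.ofList
      ((counts.zip rest).foldl
        (fun st p => pvRun ((p.1, st.2) :: st.1) [] p.2)
        (pvRun [] [] s0)).2

-- ===== PRECONDITION & SPEC =====
-- Pre_ excludes exactly the inputs on which the Python A raises: a group terminator (any
-- non-alpha/non-digit/non-'[' char) with no open group (IndexError from pop on []), or a '['
-- with no digit since the previous '[' (ValueError from int('')).  B raises on exactly the
-- same inputs, so nothing on which A returns is excluded.  The scan below only tracks the
-- open-group depth and whether a digit is pending — a balanced-brackets-style shape check,
-- not a re-simulation of the decoding.
def pvPreStep (st : Option (Nat × Bool)) (c : Char) : Option (Nat × Bool) :=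
  match st with
  | none => none
  | some (depth, hasDigit) =>
    if PySem.Chars.isalpha c then some (depth, hasDigit)
    else if c ∈ "0123456789".toList then some (depth, true)
    else if c = '[' then (if hasDigit then some (depth + 1, false) else none)
    else
      match depth with
      | 0 => none
      | d + 1 => some (d, hasDigit)

def Pre_encrypted_instructions (instruction : String) : Prop :=
  (instruction.toList.foldl pvPreStep (some (0, false))).isSome = true

instance (instruction : String) : Decidable (Pre_encrypted_instructions instruction) := by
  unfold Pre_encrypted_instructions; infer_instance

def pvWitness_encrypted_instructions : String := "10[ab2[c]x]"

def Spec_encrypted_instructions (instruction : String) (out : String) : Prop :=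
  out = encrypted_instructions_alt instruction
instance (instruction : String) (out : String) : Decidable (Spec_encrypted_instructions instruction out) := by
  unfold Spec_encrypted_instructions; infer_instance

-- ===== CLAIM (what is proved, stated in full; the proofs are below) =====
def Claim_equal_encrypted_instructions : Prop := ∀ (instruction : String), Dom_encrypted_instructions instruction → Pre_encrypted_instructions instruction → Spec_encrypted_instructions instruction (encrypted_instructions instruction)

-- ===== LEMMAS AND PROOFS =====

-- A's set test on a 1-char string is digit-membership of the char
theorem pvMemNumbers (c : Char) :
    PySem.Set.contains pvNumbersSet (String.ofList [c]) = decide (c ∈ "0123456789".toList) := by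
  have h : pvNumbersSet = ["0","1","2","3","4","5","6","7","8","9"] := by decide
  rw [h, PySem.Set.contains_eq_listContains]
  simp [List.contains_eq_mem, String.ext_iff]

theorem pvDigit_not_alpha (c : Char) (h : c ∈ "0123456789".toList) :
    PySem.Chars.isalpha c = false := by
  simp at h
  rcases h with rfl|rfl|rfl|rfl|rfl|rfl|rfl|rfl|rfl|rfl <;> decide

-- a plain structural single-char split, easier to reason about than splitOn.go
def pvSplit1 (c : Char) : List Char → List (List Char)
  | [] => [[]]
  | x :: rest =>
    if x = c then [] :: pvSplit1 c rest
    else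
      match pvSplit1 c rest with
      | [] => [[x]]
      | s :: ss => (x :: s) :: ss

theorem pvSplit1_ne_nil (c : Char) (l : List Char) : pvSplit1 c l ≠ [] := by
  cases l with
  | nil => simp [pvSplit1]
  | cons x rest =>
    simp only [pvSplit1]
    split
    · simp
    · split <;> simp

def pvConsHead (pre : List Char) : List (List Char) → List (List Char)
  | [] => [pre]
  | s :: ss => (pre ++ s) :: ss

theorem pvGoSpec (c : Char) (l : List Char) : ∀ fuel, l.length ≤ fuel → ∀ cur acc,
    PySem.Chars.splitOn.go [c] fuel l cur acc =
      acc.reverse ++ pvConsHead cur.reverse (pvSplit1 c l) := by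
  induction l with
  | nil =>
    intro fuel _ cur acc
    cases fuel <;> simp [PySem.Chars.splitOn.go, pvSplit1, pvConsHead]
  | cons x rest ih =>
    intro fuel hf cur acc
    cases fuel with
    | zero => simp at hf
    | succ f =>
      have hf' : rest.length ≤ f := by simp [List.length_cons] at hf; omega
      by_cases hx : x = c
      · subst hx
        have hpre : [x].isPrefixOf (x :: rest) = true := by simp [List.isPrefixOf]
        rw [PySem.Chars.splitOn.go]
        simp only [hpre, if_true, List.length_cons, List.length_nil, List.drop_succ_cons,
          List.drop_zero]
        rw [ih f hf' [] (cur.reverse :: acc)]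
        obtain ⟨s, ss, hs⟩ : ∃ s ss, pvSplit1 x rest = s :: ss := by
          cases h : pvSplit1 x rest with
          | nil => exact absurd h (pvSplit1_ne_nil x rest)
          | cons s ss => exact ⟨s, ss, rfl⟩
        simp [pvSplit1, hs, pvConsHead]
      · have hpre : [c].isPrefixOf (x :: rest) = false := by
          simp [List.isPrefixOf]; exact fun h => absurd h.symm hx
        rw [PySem.Chars.splitOn.go]
        simp only [hpre, if_false, Bool.false_eq_true]
        rw [ih f hf' (x :: cur) acc]
        obtain ⟨s, ss, hs⟩ : ∃ s ss, pvSplit1 c rest = s :: ss := by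
          cases h : pvSplit1 c rest with
          | nil => exact absurd h (pvSplit1_ne_nil c rest)
          | cons s ss => exact ⟨s, ss, rfl⟩
        simp [pvSplit1, hx, hs, pvConsHead]

theorem pvSplitOn_eq (c : Char) (l : List Char) :
    PySem.Chars.splitOn l [c] = pvSplit1 c l := by
  rw [PySem.Chars.splitOn, pvGoSpec c l (l.length + 1) (by omega) [] []]
  obtain ⟨s, ss, hs⟩ : ∃ s ss, pvSplit1 c l = s :: ss := by
    cases h : pvSplit1 c l with
    | nil => exact absurd h (pvSplit1_ne_nil c l)
    | cons s ss => exact ⟨s, ss, rfl⟩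
  simp [hs, pvConsHead]

def pvRecon (c : Char) : List (List Char) → List Char
  | [] => []
  | s :: ss => s ++ ss.flatMap (fun t => c :: t)

theorem pvRecon_split1 (c : Char) (l : List Char) : pvRecon c (pvSplit1 c l) = l := by
  induction l with
  | nil => simp [pvSplit1, pvRecon]
  | cons x rest ih =>
    obtain ⟨s, ss, hs⟩ : ∃ s ss, pvSplit1 c rest = s :: ss := by
      cases h : pvSplit1 c rest with
      | nil => exact absurd h (pvSplit1_ne_nil c rest)
      | cons s ss => exact ⟨s, ss, rfl⟩
    by_cases hx : x = c
    · subst hx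
      simp only [pvSplit1, pvRecon]
      rw [hs] at ih ⊢
      simp only [pvRecon] at ih ⊢
      simp [ih]
    · simp only [pvSplit1, if_neg hx, hs, pvRecon]
      rw [hs] at ih
      simp only [pvRecon] at ih
      simp [ih]

theorem pvMem_split1_no_sep (c : Char) (l : List Char) :
    ∀ s ∈ pvSplit1 c l, c ∉ s := by
  induction l with
  | nil => simp [pvSplit1]
  | cons x rest ih =>
    by_cases hx : x = c
    · subst hx
      simp only [pvSplit1]
      intro s hs
      rcases List.mem_cons.mp hs with hs | hs
      · simp [hs]
      · exact ih s hs
    · obtain ⟨s, ss, h1⟩ : ∃ s ss, pvSplit1 c rest = s :: ss := by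
        cases h : pvSplit1 c rest with
        | nil => exact absurd h (pvSplit1_ne_nil c rest)
        | cons s ss => exact ⟨s, ss, rfl⟩
      simp only [pvSplit1, if_neg hx, h1]
      intro t ht
      rcases List.mem_cons.mp ht with ht | ht
      · subst ht
        intro hc
        rcases List.mem_cons.mp hc with hc | hc
        · exact hx hc.symm
        · exact ih s (by simp [h1]) hc
      · exact ih t (by simp [h1, ht])

-- A's scan over one '['-free segment = B's run, with the digits of the segment appended to rc
theorem pvSegment (seg : List Char) (hseg : '[' ∉ seg) :
    ∀ stack rc res,
      List.foldl pvAStep (stack, rc, res) seg =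
        ((pvRun stack res seg).1,
         rc ++ seg.filter (fun ch => decide (ch ∈ "0123456789".toList)),
         (pvRun stack res seg).2) := by
  induction seg with
  | nil => intro stack rc res; simp [pvRun]
  | cons ch rest ih =>
    intro stack rc res
    have hrest : '[' ∉ rest := fun h => hseg (by simp [h])
    have hch : ch ≠ '[' := fun h => hseg (by simp [h])
    simp only [List.foldl_cons, pvRun, pvAStep, pvRunStep, pvMemNumbers]
    by_cases ha : PySem.Chars.isalpha ch = true
    · have hd : (decide (ch ∈ "0123456789".toList)) = false := by
        by_cases hm : ch ∈ "0123456789".toList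
        · exact absurd ha (by simp [pvDigit_not_alpha ch hm])
        · exact decide_eq_false hm
      simp only [ha, if_true, List.filter_cons, hd, Bool.false_eq_true, if_false]
      exact ih hrest stack rc (res ++ [ch])
    · simp only [Bool.not_eq_true] at ha
      by_cases hm : ch ∈ "0123456789".toList
      · have hd : (decide (ch ∈ "0123456789".toList)) = true := decide_eq_true hm
        simp only [ha, Bool.false_eq_true, if_false, hd, if_true, List.filter_cons]
        rw [ih hrest stack (rc ++ [ch]) res]
        simp [pvRun]
      · have hd : (decide (ch ∈ "0123456789".toList)) = false := decide_eq_false hm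
        simp only [ha, Bool.false_eq_true, if_false, hd, hch, List.filter_cons]
        cases stack with
        | nil =>
          rw [ih hrest [] rc res]
          simp [pvRun]
        | cons top rest' =>
          rw [ih hrest rest' rc (top.2 ++ (List.replicate top.1.toNat res).flatten)]
          simp [pvRun]

-- the tail of A's scan, one '['-prefixed segment at a time, = B's fold over (count, segment) pairs
theorem pvTail (segs : List (List Char)) (hs : ∀ s ∈ segs, '[' ∉ s) :
    ∀ (prev : List Char) stack res,
      (List.foldl pvAStep
          (stack, prev.filter (fun ch => decide (ch ∈ "0123456789".toList)), res)
          (segs.flatMap (fun s => '[' :: s))).2.2 =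
        ((((prev :: segs).dropLast.map pvCount).zip segs).foldl
          (fun st p => pvRun ((p.1, st.2) :: st.1) [] p.2) (stack, res)).2 := by
  induction segs with
  | nil => intro prev stack res; simp
  | cons s rest ih =>
    intro prev stack res
    have hsmem : '[' ∉ s := hs s (by simp)
    have hrest : ∀ t ∈ rest, '[' ∉ t := fun t ht => hs t (by simp [ht])
    have hstep :
        pvAStep (stack, prev.filter (fun ch => decide (ch ∈ "0123456789".toList)), res) '[' =
          ((pvCount prev, res) :: stack, [], []) := by
      have h1 : PySem.Chars.isalpha '[' = false := by decide
      have h2 : PySem.Set.contains pvNumbersSet (String.ofList ['[']) = false := by decide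
      simp only [pvAStep, h1, Bool.false_eq_true, if_false, h2, if_true, pvCount]
    simp only [List.flatMap_cons, List.foldl_append, List.foldl_cons, hstep]
    rw [pvSegment s hsmem ((pvCount prev, res) :: stack) [] []]
    simp only [List.nil_append]
    rw [ih hrest s (pvRun ((pvCount prev, res) :: stack) [] s).1
        (pvRun ((pvCount prev, res) :: stack) [] s).2]
    have hdl : (prev :: s :: rest).dropLast = prev :: (s :: rest).dropLast := rfl
    simp [hdl, pvRun]

-- ===== VERDICT (by name: the statement is the Claim_ definition above) =====
theorem encrypted_instructions_spec : Claim_equal_encrypted_instructions := by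
  intro instruction _ _
  unfold Spec_encrypted_instructions encrypted_instructions encrypted_instructions_alt
  rw [pvSplitOn_eq]
  obtain ⟨s0, rest, hsplit⟩ : ∃ s0 rest, pvSplit1 '[' instruction.toList = s0 :: rest := by
    cases h : pvSplit1 '[' instruction.toList with
    | nil => exact absurd h (pvSplit1_ne_nil _ _)
    | cons s ss => exact ⟨s, ss, rfl⟩
  have hrecon : instruction.toList = s0 ++ rest.flatMap (fun t => '[' :: t) := by
    conv_lhs => rw [← pvRecon_split1 '[' instruction.toList]
    rw [hsplit]; rfl
  have hs0 : '[' ∉ s0 := pvMem_split1_no_sep '[' instruction.toList s0 (by simp [hsplit])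
  have hrest : ∀ t ∈ rest, '[' ∉ t :=
    fun t ht => pvMem_split1_no_sep '[' instruction.toList t (by simp [hsplit, ht])
  simp only [hsplit]
  conv_lhs => rw [hrecon]
  rw [List.foldl_append, pvSegment s0 hs0 [] [] []]
  simp only [List.nil_append]
  rw [pvTail rest hrest s0 (pvRun [] [] s0).1 (pvRun [] [] s0).2]
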